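-- pv_equiv track=rewrite | github.com/mattrobball/BridgelandStability | scripts/generate_site.py | ordered_groups
-- ===== SOURCE A (Python) =====
-- CHAPTER_ORDER = [
--     "PostnikovTower",
--     "GrothendieckGroup",
--     "EulerForm",
--     "ExtensionClosure",
--     "QuasiAbelian",
--     "TStructure",
--     "IntervalCategory",
--     "StabilityFunction",
--     "Slicing",
--     "NumericalStability",
--     "NumericalStabilityManifold",
--     "HeartEquivalence",
--     "StabilityCondition",
--     "Deformation",
-- ]
--
-- def ordered_groups(groups: dict[str, list[str]]) -> list[tuple[str, list[str]]]:
--     """Return groups in mathematical dependency order."""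
--     result = []
--     seen = set()
--     for name in CHAPTER_ORDER:
--         if name in groups:
--             result.append((name, groups[name]))
--             seen.add(name)
--     # Append any groups not in the predefined order (alphabetically)
--     for name in sorted(groups):
--         if name not in seen:
--             result.append((name, groups[name]))
--     return result
-- ===== SOURCE B (Python) =====
-- CHAPTER_ORDER = [
--     "PostnikovTower",
--     "GrothendieckGroup",
--     "EulerForm",
--     "ExtensionClosure",
--     "QuasiAbelian",
--     "TStructure",
--     "IntervalCategory",
--     "StabilityFunction",
--     "Slicing",
--     "NumericalStability",
--     "NumericalStabilityManifold",
--     "HeartEquivalence",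
--     "StabilityCondition",
--     "Deformation",
-- ]
--
--
-- def ordered_groups(groups: dict[str, list[str]]) -> list[tuple[str, list[str]]]:
--     """Return groups in mathematical dependency order (single keyed sort)."""
--     order_index = {name: i for i, name in enumerate(CHAPTER_ORDER)}
--     fallback = len(CHAPTER_ORDER)
--     names = sorted(groups, key=lambda n: (order_index.get(n, fallback), n))
--     return [(n, groups[n]) for n in names]
-- ===== Notes on version B (the rewrite author's own statement) =====
-- stated objective: simpler
-- what changed: Replaces A's two-phase construction (a priority walk over CHAPTER_ORDER with a seen-set, then an alphabetical pass over the leftover names) by a single keyed sort of the dict keys under the composite key (order_index.get(name, len(CHAPTER_ORDER)), name).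
import Mathlib
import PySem

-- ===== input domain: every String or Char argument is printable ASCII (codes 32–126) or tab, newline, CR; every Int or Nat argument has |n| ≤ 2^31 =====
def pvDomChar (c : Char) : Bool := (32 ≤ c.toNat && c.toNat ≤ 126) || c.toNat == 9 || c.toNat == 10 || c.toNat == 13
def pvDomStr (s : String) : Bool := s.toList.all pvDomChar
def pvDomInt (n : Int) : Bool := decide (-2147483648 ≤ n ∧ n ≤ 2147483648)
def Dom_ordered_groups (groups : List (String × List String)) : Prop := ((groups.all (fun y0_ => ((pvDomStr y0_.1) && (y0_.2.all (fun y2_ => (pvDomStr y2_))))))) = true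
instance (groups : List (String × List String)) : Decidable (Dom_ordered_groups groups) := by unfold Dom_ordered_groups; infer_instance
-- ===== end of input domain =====

-- B replaces A's two loops (priority walk + alphabetical tail with a seen-set) by one
-- keyed sort of the dict keys; same cost, simpler decomposition.

def CHAPTER_ORDER : List String :=
  ["PostnikovTower", "GrothendieckGroup", "EulerForm", "ExtensionClosure",
   "QuasiAbelian", "TStructure", "IntervalCategory", "StabilityFunction",
   "Slicing", "NumericalStability", "NumericalStabilityManifold",
   "HeartEquivalence", "StabilityCondition", "Deformation"]

-- ===== PORT A =====
-- groups[name] is only reached when name is a key, so the total lookup getD _ [] is exact.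
def ordered_groups (groups : List (String × List String)) : List (String × List String) :=
  let d : PySem.Dict String (List String) := PySem.Dict.ofList groups
  let rs : List (String × List String) × PySem.Set String :=
    CHAPTER_ORDER.foldl
      (fun acc name =>
        if d.contains name then (acc.1 ++ [(name, d.getD name [])], PySem.Set.add acc.2 name)
        else acc)
      ([], PySem.Set.empty)
  (PySem.List.sorted d.keys (fun n => n) false).foldl
    (fun result name =>
      if !(PySem.Set.contains rs.2 name) then result ++ [(name, d.getD name [])] else result)
    rs.1

-- ===== PORT B =====
-- Python's tuple key (order_index.get(n, fallback), n) compares lexicographically = Prod.Lex.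
def ordered_groups_alt (groups : List (String × List String)) : List (String × List String) :=
  let d : PySem.Dict String (List String) := PySem.Dict.ofList groups
  let orderIndex : PySem.Dict String Int :=
    PySem.Dict.ofList ((PySem.List.enumerate CHAPTER_ORDER).map (fun p => (p.2, p.1)))
  let fallback : Int := (CHAPTER_ORDER.length : Int)
  let names :=
    PySem.List.sorted d.keys (fun n => toLex ((orderIndex.getD n fallback : Int), n)) false
  names.map (fun n => (n, d.getD n []))

-- ===== PRECONDITION & SPEC =====
def Spec_ordered_groups (groups : List (String × List String)) (out : List (String × List String)) : Prop := out = ordered_groups_alt groups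
instance (groups : List (String × List String)) (out : List (String × List String)) : Decidable (Spec_ordered_groups groups out) := by unfold Spec_ordered_groups; infer_instance

-- ===== CLAIM (what is proved, stated in full; the proofs are below) =====
def Claim_equal_ordered_groups : Prop := ∀ (groups : List (String × List String)), Dom_ordered_groups groups → Spec_ordered_groups groups (ordered_groups groups)

-- ===== LEMMAS AND PROOFS =====

def pvOI : PySem.Dict String Int :=
  PySem.Dict.ofList ((PySem.List.enumerate CHAPTER_ORDER).map (fun p => (p.2, p.1)))

def pvKey (n : String) : Lex (Int × String) := toLex ((pvOI.getD n 14 : Int), n)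

lemma pvOI_keys : pvOI.keys = CHAPTER_ORDER := by decide

lemma pvIdx_of_not_mem {n : String} (h : n ∉ CHAPTER_ORDER) : pvOI.getD n 14 = 14 := by
  apply PySem.Dict.getD_of_not_contains
  rw [PySem.Dict.contains_eq_decide_mem_keys, pvOI_keys]
  simpa using h

lemma pvIdx_lt_of_mem : ∀ a ∈ CHAPTER_ORDER, pvOI.getD a 14 < 14 := by decide

lemma pvChap_pairwise : CHAPTER_ORDER.Pairwise (fun a b => pvKey a < pvKey b) := by decide

lemma pvChap_nodup : CHAPTER_ORDER.Nodup := by decide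

lemma pvFoldA (d : PySem.Dict String (List String)) :
    ∀ (l : List String) (acc : List (String × List String)) (s : PySem.Set String),
    l.foldl
      (fun acc name =>
        if d.contains name then (acc.1 ++ [(name, d.getD name [])], PySem.Set.add acc.2 name)
        else acc)
      (acc, s)
    = (acc ++ (l.filter (fun n => d.contains n)).map (fun n => (n, d.getD n [])),
       PySem.Set.update s (l.filter (fun n => d.contains n))) := by
  intro l
  induction l with
  | nil => intro acc s; simp [PySem.Set.update]
  | cons a t ih =>
    intro acc s
    by_cases h : d.contains a
    · rw [List.foldl_cons]
      simp only [h, if_true]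
      rw [ih]
      simp [PySem.Set.update, h]
    · rw [List.foldl_cons]
      simp only [h, if_false, Bool.false_eq_true]
      rw [ih]
      simp [h]

-- ===== VERDICT (by name: the statement is the Claim_ definition above) =====
theorem ordered_groups_spec : Claim_equal_ordered_groups := by
  intro groups _
  unfold Spec_ordered_groups ordered_groups ordered_groups_alt
  simp only [pvFoldA, PySem.List.foldl_append_if]
  have hkey : (fun n => toLex (((PySem.Dict.ofList ((PySem.List.enumerate CHAPTER_ORDER).map (fun p => (p.2, p.1)))).getD n ((CHAPTER_ORDER.length : Int)) : Int), n)) = pvKey := by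
    funext n
    have h14 : ((CHAPTER_ORDER.length : Nat) : Int) = 14 := by decide
    rw [pvKey, pvOI, h14]
  rw [hkey]
  set d : PySem.Dict String (List String) := PySem.Dict.ofList groups with hd
  set K := d.keys with hK
  have hndK : K.Nodup := PySem.Dict.nodup_keys_ofList groups
  set prio := CHAPTER_ORDER.filter (fun n => d.contains n) with hprio
  have hupd : PySem.Set.update PySem.Set.empty prio = PySem.Set.ofList prio := rfl
  rw [hupd]
  set rest := (PySem.List.sorted K (fun n => n) false).filter
      (fun n => !(PySem.Set.contains (PySem.Set.ofList prio) n)) with hrest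
  -- membership characterisations
  have hmem_prio : ∀ n, n ∈ prio ↔ n ∈ CHAPTER_ORDER ∧ n ∈ K := by
    intro n
    simp [hprio, List.mem_filter, PySem.Dict.contains_iff_mem_keys, ← hK]
  have hmem_rest : ∀ n, n ∈ rest ↔ n ∈ K ∧ n ∉ prio := by
    intro n
    simp [hrest, List.mem_filter, PySem.List.mem_sorted, PySem.Set.mem_ofList]
  -- nodup and disjointness
  have hnd_prio : prio.Nodup := pvChap_nodup.filter _
  have hnd_sorted : (PySem.List.sorted K (fun n => n) false).Nodup :=
    (PySem.List.sorted_perm K (fun n => n) false).symm.nodup hndK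
  have hnd_rest : rest.Nodup := hnd_sorted.filter _
  have hdisj : List.Disjoint prio rest := by
    intro a ha hr
    exact ((hmem_rest a).mp hr).2 ha
  have hnd_app : (prio ++ rest).Nodup := List.Nodup.append hnd_prio hnd_rest hdisj
  -- permutation
  have hperm : (prio ++ rest).Perm K := by
    rw [List.perm_ext_iff_of_nodup hnd_app hndK]
    intro n
    simp only [List.mem_append, hmem_prio, hmem_rest]
    tauto
  -- pairwise strictly increasing under pvKey
  have hnotmem_of_rest : ∀ n ∈ rest, n ∉ CHAPTER_ORDER := by
    intro n hn hc
    have h := (hmem_rest n).mp hn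
    exact h.2 ((hmem_prio n).mpr ⟨hc, h.1⟩)
  have hpw : (prio ++ rest).Pairwise (fun a b => pvKey a < pvKey b) := by
    rw [List.pairwise_append]
    refine ⟨pvChap_pairwise.sublist List.filter_sublist, ?_, ?_⟩
    · have h1 : (PySem.List.sorted K (fun n => n) false).Pairwise (fun a b : String => a < b) := by
        have := (PySem.List.sorted_pairwise K (fun n => n)).and hnd_sorted
        exact this.imp (fun h => lt_of_le_of_ne h.1 h.2)
      have h2 : rest.Pairwise (fun a b : String => a < b) := h1.sublist List.filter_sublist
      refine h2.imp_of_mem ?_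
      intro a b ha hb hab
      have hia : pvOI.getD a 14 = 14 := pvIdx_of_not_mem (hnotmem_of_rest a ha)
      have hib : pvOI.getD b 14 = 14 := pvIdx_of_not_mem (hnotmem_of_rest b hb)
      rw [pvKey, pvKey, Prod.Lex.toLex_lt_toLex, hia, hib]
      exact Or.inr ⟨rfl, hab⟩
    · intro a ha b hb
      have hia : pvOI.getD a 14 < 14 := pvIdx_lt_of_mem a (List.mem_of_mem_filter ha)
      have hib : pvOI.getD b 14 = 14 := pvIdx_of_not_mem (hnotmem_of_rest b hb)
      rw [pvKey, pvKey, Prod.Lex.toLex_lt_toLex, hib]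
      exact Or.inl hia
  have hmain : PySem.List.sorted K pvKey = prio ++ rest :=
    PySem.List.sorted_eq_of_perm_of_pairwise_lt K (prio ++ rest) pvKey hperm hpw
  rw [hmain, List.map_append, List.nil_append]
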